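-- pv_equiv track=rewrite | github.com/gabrielpxo/learning-algorithms | L1Q6 - Odd-odd.py | impar_impar
-- ===== SOURCE A (Python) =====
-- def impar_impar(L):
--
--     #Cria a lista de resultado
--     resultado = []
--
--     #Assumimos que cada elemento da lista e um numero
--     for i in range (len(L)):
--         numero = L[i]
--
--         #Sendo esse numero impar, contamos sua ocorrencia
--         if (numero % 2 != 0):
--             cont = ocorrencias(L, numero)
--
--             #Caso o numero ainda nao esteja na lista resultado, adicionamo-lo
--             if (cont % 2 != 0 and numero not in resultado):
--                 resultado = add_numero(resultado, numero)
--
--     return resultado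
--
-- def ocorrencias(L, numero):
--     cont = 0
--     for i in range (len(L)):
--         if (L[i] == numero):
--             cont += 1
--
--     return cont
--
-- def add_numero(L, numero):
--
--     #A lista atualizada e inicializada com zeros (que indicam os espacos na lista)
--     lista_atualizada = [0] * (len(L) + 1) #Entao, multiplicamos esses espacos pelo tamanho da lista resultado mais uma posicao, para caber o novo numero
--     for i in range(len(L)):
--         lista_atualizada[i] = L[i] #A nova lista e atualizada contendo os numeros anteriores
--     lista_atualizada[-1] = numero #O novo numero e posto no final (-1)
--
--     return lista_atualizada
-- ===== SOURCE B (Python) =====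
-- def impar_impar(L):
--     counts = {}
--     for x in L:
--         if x % 2 != 0:
--             counts[x] = counts.get(x, 0) + 1
--     return [x for x, c in counts.items() if c % 2 != 0]
-- ===== Notes on version B (the rewrite author's own statement) =====
-- stated objective: alternative
-- what changed: Replaced A's per-element full rescans (a count pass plus a duplicate-membership check for every position, and a copy-into-fresh-list append helper) by a single counting pass building a dict of the odd elements and one pass over its distinct keys in first-appearance order.
import Mathlib
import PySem

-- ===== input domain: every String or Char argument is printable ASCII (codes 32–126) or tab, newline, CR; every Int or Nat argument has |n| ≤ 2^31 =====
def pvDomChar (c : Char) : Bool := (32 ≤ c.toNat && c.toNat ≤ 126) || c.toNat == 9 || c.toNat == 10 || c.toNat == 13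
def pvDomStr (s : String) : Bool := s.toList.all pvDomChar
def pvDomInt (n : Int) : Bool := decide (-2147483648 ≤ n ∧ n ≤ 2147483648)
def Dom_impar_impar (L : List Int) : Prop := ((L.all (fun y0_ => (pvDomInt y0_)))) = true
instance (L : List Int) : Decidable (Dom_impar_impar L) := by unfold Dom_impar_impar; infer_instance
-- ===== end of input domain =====

-- B replaces A's per-element rescan (count + duplicate-membership check) by one counting pass
-- over a dict of the odd elements and one pass over its distinct keys (objective: alternative).

-- ===== PORT A =====
def ocorrencias (L : List Int) (numero : Int) : Int :=
  (PySem.List.pyRange 0 (L.length : Int) 1).foldl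
    (fun cont i => if PySem.List.pyGetD L i 0 == numero then cont + 1 else cont) 0

def add_numero (L : List Int) (numero : Int) : List Int :=
  let lista0 := List.replicate (L.length + 1) (0 : Int)
  let lista1 := (PySem.List.pyRange 0 (L.length : Int) 1).foldl
    (fun acc i => PySem.List.pySetD acc i (PySem.List.pyGetD L i 0)) lista0
  PySem.List.pySetD lista1 (-1) numero

def impar_impar (L : List Int) : List Int :=
  (PySem.List.pyRange 0 (L.length : Int) 1).foldl
    (fun resultado i =>
      let numero := PySem.List.pyGetD L i 0
      if PySem.Int.mod numero 2 ≠ 0 then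
        let cont := ocorrencias L numero
        if PySem.Int.mod cont 2 ≠ 0 ∧ numero ∉ resultado then add_numero resultado numero
        else resultado
      else resultado) []

-- ===== PORT B =====
def impar_impar_alt (L : List Int) : List Int :=
  let counts : PySem.Dict Int Int :=
    L.foldl (fun d x =>
      if PySem.Int.mod x 2 ≠ 0 then d.insert x (d.getD x 0 + 1) else d) PySem.Dict.empty
  (counts.items.filter (fun pc => PySem.Int.mod pc.2 2 != 0)).map (fun pc => pc.1)

-- ===== PRECONDITION & SPEC =====
def Spec_impar_impar (L : List Int) (out : List Int) : Prop := out = impar_impar_alt L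
instance (L : List Int) (out : List Int) : Decidable (Spec_impar_impar L out) := by unfold Spec_impar_impar; infer_instance

-- ===== CLAIM (what is proved, stated in full; the proofs are below) =====
def Claim_equal_impar_impar : Prop := ∀ (L : List Int), Dom_impar_impar L → Spec_impar_impar L (impar_impar L)

-- ===== LEMMAS AND PROOFS =====

-- ocorrencias L n counts the occurrences of n in L
theorem ocorrencias_eq (L : List Int) (numero : Int) :
    ocorrencias L numero = (L.count numero : Int) := by
  unfold ocorrencias
  rw [PySem.List.foldl_pyRange_zero_pyGetD' L 0
        (fun cont x => if x == numero then cont + 1 else cont) 0,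
      PySem.List.foldl_beq_add_one]
  simp

-- the copying loop of add_numero, after the first n indices
theorem add_numero_copy (L : List Int) : ∀ (n : Nat), n ≤ L.length →
    (PySem.List.pyRange 0 (n : Int) 1).foldl
      (fun acc i => PySem.List.pySetD acc i (PySem.List.pyGetD L i 0))
      (List.replicate (L.length + 1) (0 : Int))
    = L.take n ++ List.replicate (L.length + 1 - n) 0 := by
  intro n hn
  induction n with
  | zero => simp [PySem.List.pyRange_one_eq_nil]
  | succ m ih =>
    have hm : m ≤ L.length := Nat.le_of_succ_le hn
    have hrange : PySem.List.pyRange 0 ((m + 1 : Nat) : Int) 1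
        = PySem.List.pyRange 0 (m : Int) 1 ++ [(m : Int)] := by
      push_cast
      exact PySem.List.pyRange_one_succ_right (by positivity)
    rw [hrange, List.foldl_append, ih hm]
    have hlt : m < L.length := hn
    simp only [List.foldl_cons, List.foldl_nil, PySem.List.pySetD_natCast,
      PySem.List.pyGetD_natCast]
    rw [List.getD_eq_getElem L 0 hlt]
    have hlenTake : (L.take m).length = m := by simp [hm]
    have hrep : L.length + 1 - m = (L.length - m) + 1 := by omega
    rw [List.set_append]
    simp only [hlenTake, Nat.lt_irrefl, if_false, Nat.sub_self]
    rw [hrep, List.replicate_succ, List.set_cons_zero,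
      List.take_succ_eq_append_getElem hlt, List.append_assoc]
    have : L.length + 1 - (m + 1) = L.length - m := by omega
    simp [this]

-- add_numero appends
theorem add_numero_eq (res : List Int) (numero : Int) :
    add_numero res numero = res ++ [numero] := by
  show PySem.List.pySetD
      ((PySem.List.pyRange 0 (res.length : Int) 1).foldl
        (fun acc i => PySem.List.pySetD acc i (PySem.List.pyGetD res i 0))
        (List.replicate (res.length + 1) (0 : Int))) (-1) numero = res ++ [numero]
  rw [add_numero_copy res res.length (le_refl _)]
  simp only [List.take_length, Nat.add_sub_cancel_left, List.replicate_one]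
  simp [PySem.List.pySetD, PySem.List.pySet?, PySem.List.pyIdx?]

-- building a set from a list on top of an existing set s appends exactly the
-- first occurrences of elements not already in s
theorem foldl_add_eq (l : List Int) : ∀ (s : List Int),
    l.foldl PySem.Set.add s
    = s ++ (PySem.Set.ofList l).filter (fun y => !decide (y ∈ s)) := by
  induction l with
  | nil => intro s; simp [PySem.Set.ofList, PySem.Set.empty]
  | cons x l ih =>
    intro s
    have hofl : PySem.Set.ofList (x :: l)
        = [x] ++ (PySem.Set.ofList l).filter (fun y => !decide (y ∈ ([x] : List Int))) := by
      show (x :: l).foldl PySem.Set.add PySem.Set.empty = _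
      rw [List.foldl_cons]
      have hx : PySem.Set.add PySem.Set.empty x = [x] := by
        simp [PySem.Set.add, PySem.Set.empty, PySem.Set.contains]
      rw [hx, ih]
    rw [List.foldl_cons, ih, hofl]
    by_cases hmem : x ∈ s
    · have hadd : PySem.Set.add s x = s := by
        simp [PySem.Set.add, PySem.Set.contains, hmem]
      rw [hadd, List.filter_append, List.filter_filter]
      have h1 : List.filter (fun y => !decide (y ∈ s)) [x] = [] := by simp [hmem]
      rw [h1]
      simp only [List.nil_append]
      congr 1
      apply List.filter_congr
      intro y _
      by_cases hyx : y = x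
      · subst hyx; simp [hmem]
      · simp [hyx]
    · have hadd : PySem.Set.add s x = s ++ [x] := by
        simp [PySem.Set.add, PySem.Set.contains, hmem]
      rw [hadd, List.filter_append, List.filter_filter]
      have h1 : List.filter (fun y => !decide (y ∈ s)) [x] = [x] := by simp [hmem]
      rw [h1, List.append_assoc]
      congr 2
      apply List.filter_congr
      intro y _
      by_cases hyx : y = x
      · subst hyx; simp [hmem]
      · by_cases hys : y ∈ s <;> simp [hyx, hys, List.mem_append]

-- closed form of Set.ofList on a cons
theorem ofList_cons (x : Int) (l : List Int) :
    PySem.Set.ofList (x :: l)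
    = x :: (PySem.Set.ofList l).filter (fun y => !decide (y = x)) := by
  show (x :: l).foldl PySem.Set.add PySem.Set.empty = _
  rw [List.foldl_cons]
  have hx : PySem.Set.add PySem.Set.empty x = [x] := by
    simp [PySem.Set.add, PySem.Set.empty, PySem.Set.contains]
  rw [hx, foldl_add_eq]
  simp

-- A's main loop: append-on-first-occurrence-if-p equals filtering the ordered set of l
theorem loopA (p : Int → Prop) [DecidablePred p] (l : List Int) : ∀ (res : List Int),
    l.foldl (fun r x => if p x ∧ x ∉ r then r ++ [x] else r) res
    = res ++ ((PySem.Set.ofList l).filter (fun y => decide (p y))).filter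
        (fun y => !(decide (y ∈ res))) := by
  induction l with
  | nil => intro res; simp [PySem.Set.ofList, PySem.Set.empty]
  | cons x l ih =>
    intro res
    rw [List.foldl_cons, ofList_cons, List.filter_cons]
    by_cases hcond : p x ∧ x ∉ res
    · obtain ⟨hp, hr⟩ := hcond
      rw [if_pos ⟨hp, hr⟩, ih]
      simp only [hp, decide_true, List.filter_cons, hr, decide_false,
        Bool.not_false, if_pos, List.filter_filter, List.append_assoc]
      congr 1
      simp only [List.singleton_append]
      congr 1
      apply List.filter_congr
      intro y _
      by_cases hyx : y = x
      · subst hyx; simp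
      · by_cases hys : y ∈ res <;> simp [hyx, hys, List.mem_append]
    · rw [if_neg hcond, ih, List.filter_filter]
      by_cases hp : p x
      · have hr : x ∈ res := by tauto
        rw [if_pos (by simpa using hp), List.filter_cons_of_neg (by simp [hr]),
          List.filter_filter, List.filter_filter]
        congr 1
        apply List.filter_congr
        intro y _
        by_cases hyx : y = x
        · subst hyx; simp [hr]
        · simp [hyx]
      · rw [if_neg (by simp [hp]), List.filter_filter, List.filter_filter]
        congr 1
        apply List.filter_congr
        intro y _
        by_cases hyx : y = x
        · subst hyx; simp [hp]
        · simp [hyx]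

-- ordered-set construction commutes with filtering
theorem ofList_filter (q : Int → Bool) : ∀ (l : List Int),
    PySem.Set.ofList (l.filter q) = (PySem.Set.ofList l).filter q := by
  intro l
  induction l with
  | nil => simp [PySem.Set.ofList, PySem.Set.empty]
  | cons x l ih =>
    rw [List.filter_cons, ofList_cons]
    by_cases hq : q x = true
    · simp only [hq, if_pos]
      rw [ofList_cons, ih, List.filter_cons_of_pos hq, List.filter_filter,
        List.filter_filter]
      congr 1
      apply List.filter_congr
      intro y _
      exact Bool.and_comm _ _
    · have hq' : q x = false := by simpa using hq
      simp only [hq', Bool.false_eq_true, if_false]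
      rw [ih, List.filter_cons_of_neg (by simp [hq']), List.filter_filter]
      apply List.filter_congr
      intro y _
      by_cases hyx : y = x
      · subst hyx; simp [hq']
      · simp [hyx]

-- ===== VERDICT (by name: the statement is the Claim_ definition above) =====
theorem impar_impar_spec : Claim_equal_impar_impar := by
  intro L _
  show impar_impar L = impar_impar_alt L
  have hA : impar_impar L
      = (PySem.List.pyRange 0 (L.length : Int) 1).foldl
          (fun resultado i =>
            let numero := PySem.List.pyGetD L i 0
            if PySem.Int.mod numero 2 ≠ 0 then
              if PySem.Int.mod (ocorrencias L numero) 2 ≠ 0 ∧ numero ∉ resultado then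
                add_numero resultado numero
              else resultado
            else resultado) [] := rfl
  have hB : impar_impar_alt L
      = ((L.foldl (fun d x =>
            if PySem.Int.mod x 2 ≠ 0 then d.insert x (d.getD x 0 + 1) else d)
            PySem.Dict.empty).items.filter
          (fun pc => PySem.Int.mod pc.2 2 != 0)).map (fun pc => pc.1) := rfl
  rw [hA, hB]
  rw [PySem.List.foldl_pyRange_zero_pyGetD' L 0
        (fun resultado numero =>
          if PySem.Int.mod numero 2 ≠ 0 then
            if PySem.Int.mod (ocorrencias L numero) 2 ≠ 0 ∧ numero ∉ resultado then
              add_numero resultado numero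
            else resultado
          else resultado) []]
  have hcongr : ∀ (r : List Int), ∀ x ∈ L,
      (if PySem.Int.mod x 2 ≠ 0 then
        if PySem.Int.mod (ocorrencias L x) 2 ≠ 0 ∧ x ∉ r then add_numero r x else r
      else r)
      = (if (PySem.Int.mod x 2 ≠ 0 ∧ PySem.Int.mod ((L.count x : Nat) : Int) 2 ≠ 0) ∧ x ∉ r
          then r ++ [x] else r) := by
    intro r x _
    rw [ocorrencias_eq, add_numero_eq]
    split_ifs <;> first | rfl | tauto
  rw [PySem.List.foldl_congr_mem L _ _ [] hcongr]
  rw [loopA (fun x => PySem.Int.mod x 2 ≠ 0 ∧ PySem.Int.mod ((L.count x : Nat) : Int) 2 ≠ 0) L []]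
  have hsplit : L.foldl (fun (d : PySem.Dict Int Int) x =>
        if PySem.Int.mod x 2 ≠ 0 then d.insert x (d.getD x 0 + 1) else d) PySem.Dict.empty
      = (L.filter (fun x => decide (PySem.Int.mod x 2 ≠ 0))).foldl
          (fun d x => d.insert x (d.getD x 0 + 1)) PySem.Dict.empty :=
    PySem.List.foldl_ite_eq_foldl_filter (fun x => PySem.Int.mod x 2 ≠ 0)
      (fun (d : PySem.Dict Int Int) x => d.insert x (d.getD x 0 + 1)) L PySem.Dict.empty
  rw [hsplit, PySem.Dict.foldl_insert_getD_add_one_eq_counter, PySem.Dict.items_counter,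
      ofList_filter]
  rw [List.filter_map, List.map_map]
  simp only [List.not_mem_nil, decide_false, Bool.not_false, List.filter_true,
    List.nil_append]
  rw [show ((fun pc : Int × Int => pc.1)
        ∘ fun k => (k, ((L.filter (fun x => decide (PySem.Int.mod x 2 ≠ 0))).count k : Int)))
        = fun k : Int => k from rfl, List.map_id', List.filter_filter]
  apply List.filter_congr
  intro y _
  simp only [Function.comp]
  by_cases hq : PySem.Int.mod y 2 ≠ 0
  · have hy1 : y % 2 = 1 := by
      have h2 := hq
      rw [PySem.Int.mod_eq_emod_of_pos (by norm_num)] at h2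
      omega
    simp only [Bool.decide_and, decide_not, Bool.beq_eq_decide_eq, bne]
    simp only [PySem.Int.mod_eq_emod_of_pos (show (0:Int) < 2 by norm_num)]
    rw [List.count_filter (by simp [PySem.Int.mod_eq_emod_of_pos (show (0:Int) < 2 by norm_num), hy1])]
    simp [hy1, Bool.and_comm]
  · have hy0 : y % 2 = 0 := by
      have h2 : PySem.Int.mod y 2 = 0 := by tauto
      rw [PySem.Int.mod_eq_emod_of_pos (by norm_num)] at h2
      exact h2
    simp [hy0]
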